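-- pv_equiv track=rewrite | github.com/ryan24411390/psychage-v2 | data-pipeline/mapping/taxonomy.py | get_provider_type_slug
-- ===== SOURCE A (Python) =====
-- TAXONOMY_PREFIX_TO_TYPE = {
--     "101Y": "counselor",
--     "103T": "psychologist",
--     "1041": "social_worker",
--     "104100": "social_worker",
--     "2084": "psychiatrist",
--     "163W": "therapist",
--     "364S": "therapist",
--     "363L": "therapist",
--     "106H": "therapist",
--     "106S": "therapist",
--     "225X": "therapist",
--     "261Q": "clinic",
--     "273R": "clinic",
--     "273Y": "clinic",
--     "283Q": "clinic",
--     "322D": "clinic",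
--     "251S": "clinic",
-- }
--
-- def get_provider_type_slug(code: str) -> str:
--     """Get the provider_type slug for a taxonomy code. Defaults to 'therapist'."""
--     if not code:
--         return "therapist"
--     code = str(code).strip()
--     # Try longest prefix first for specificity
--     for prefix in sorted(TAXONOMY_PREFIX_TO_TYPE.keys(), key=len, reverse=True):
--         if code.startswith(prefix):
--             return TAXONOMY_PREFIX_TO_TYPE[prefix]
--     return "therapist"
-- ===== SOURCE B (Python) =====
-- TAXONOMY_PREFIX_TO_TYPE = {
--     "101Y": "counselor",
--     "103T": "psychologist",
--     "1041": "social_worker",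
--     "104100": "social_worker",
--     "2084": "psychiatrist",
--     "163W": "therapist",
--     "364S": "therapist",
--     "363L": "therapist",
--     "106H": "therapist",
--     "106S": "therapist",
--     "225X": "therapist",
--     "261Q": "clinic",
--     "273R": "clinic",
--     "273Y": "clinic",
--     "283Q": "clinic",
--     "322D": "clinic",
--     "251S": "clinic",
-- }
--
--
-- def get_provider_type_slug(code: str) -> str:
--     """Get the provider_type slug for a taxonomy code. Defaults to 'therapist'."""
--     code = code.strip()
--     # Key lengths in the table, longest first: index the dict with the code's
--     # own prefixes instead of scanning all keys.
--     for length in (6, 4):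
--         slug = TAXONOMY_PREFIX_TO_TYPE.get(code[:length])
--         if slug is not None:
--             return slug
--     return "therapist"
-- ===== Notes on version B (the rewrite author's own statement) =====
-- stated objective: simpler
-- what changed: Instead of scanning all 17 table keys sorted by length and testing startswith on each, B slices the code's own prefix at each distinct key length (6, then 4) and does one dict lookup per length.
import Mathlib
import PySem

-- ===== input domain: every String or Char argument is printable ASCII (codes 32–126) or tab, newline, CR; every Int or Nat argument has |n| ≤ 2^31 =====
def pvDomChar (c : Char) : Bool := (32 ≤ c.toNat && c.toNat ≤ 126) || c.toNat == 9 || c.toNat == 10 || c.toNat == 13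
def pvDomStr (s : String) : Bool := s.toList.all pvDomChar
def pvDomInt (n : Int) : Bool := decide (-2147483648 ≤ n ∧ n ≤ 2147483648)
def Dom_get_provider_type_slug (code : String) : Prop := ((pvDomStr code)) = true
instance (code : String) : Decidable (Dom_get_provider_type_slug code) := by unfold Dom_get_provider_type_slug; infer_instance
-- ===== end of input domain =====

-- B replaces A's scan of all table keys (sorted by length, startswith each) by slicing the
-- code's own prefix at each distinct key length (6 then 4) and looking it up in the dict; simpler.

-- ===== PORT A =====
-- the module constant TAXONOMY_PREFIX_TO_TYPE (shared by both versions)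
def pvTaxonomy : PySem.Dict String String := PySem.Dict.ofList
  [("101Y", "counselor"),
   ("103T", "psychologist"),
   ("1041", "social_worker"),
   ("104100", "social_worker"),
   ("2084", "psychiatrist"),
   ("163W", "therapist"),
   ("364S", "therapist"),
   ("363L", "therapist"),
   ("106H", "therapist"),
   ("106S", "therapist"),
   ("225X", "therapist"),
   ("261Q", "clinic"),
   ("273R", "clinic"),
   ("273Y", "clinic"),
   ("283Q", "clinic"),
   ("322D", "clinic"),
   ("251S", "clinic")]

-- the for-loop over the sorted keys; dict[prefix] always succeeds (prefix is a key), so getD "" is exact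
def pvScanA (code : String) : List String → String
  | [] => "therapist"
  | p :: rest =>
    if PySem.Str.startswith code p then (pvTaxonomy.get? p).getD "" else pvScanA code rest

def get_provider_type_slug (code : String) : String :=
  if code = "" then "therapist"
  else
    let code := PySem.Str.strip code
    pvScanA code (PySem.List.sorted pvTaxonomy.keys (fun k => PySem.Str.len k) true)

-- ===== PORT B =====
-- the for-loop over the two key lengths; dict.get returns none when the prefix is absent
def pvTryB (code : String) : List Int → String
  | [] => "therapist"
  | L :: rest =>
    match pvTaxonomy.get? (PySem.Str.slice code none (some L)) with
    | some slug => slug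
    | none => pvTryB code rest

def get_provider_type_slug_alt (code : String) : String :=
  pvTryB (PySem.Str.strip code) [6, 4]

-- ===== PRECONDITION & SPEC =====
def Spec_get_provider_type_slug (code : String) (out : String) : Prop := out = get_provider_type_slug_alt code
instance (code : String) (out : String) : Decidable (Spec_get_provider_type_slug code out) := by unfold Spec_get_provider_type_slug; infer_instance

-- ===== CLAIM (what is proved, stated in full; the proofs are below) =====
def Claim_equal_get_provider_type_slug : Prop := ∀ (code : String), Dom_get_provider_type_slug code → Spec_get_provider_type_slug code (get_provider_type_slug code)

-- ===== LEMMAS AND PROOFS =====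

-- A's condition "code.startswith(k)" as an equation on the first |k| characters
theorem sw_iff (c k : String) (n : Nat) (hn : k.toList.length = n) :
    PySem.Str.startswith c k = true ↔ c.toList.take n = k.toList := by
  rw [PySem.Str.startswith_eq, PySem.Chars.startswith_iff]
  constructor
  · intro hp
    obtain ⟨t, ht⟩ := hp
    rw [← ht, ← hn, List.take_left]
  · intro he; rw [← he]; exact List.take_prefix n c.toList

theorem pv_take_small (l w : List Char) (n : Nat) (hw : w.length < n) :
    l.take n = w ↔ l = w := by
  constructor
  · intro he
    have hlen : min n l.length = w.length := by rw [← he, List.length_take]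
    have hl : l.length = w.length := by omega
    rw [← he, List.take_of_length_le (by omega)]
  · intro he; subst he; exact List.take_of_length_le (by omega)

-- B's condition "k == code[:6]" for a 4-character key: code must BE the key
theorem pv_slice_small (c k : String) (hk : k.toList.length < 6) :
    (k = PySem.Str.slice c none (some 6)) ↔ c.toList = k.toList := by
  rw [← String.toList_inj]
  have hs : (PySem.Str.slice c none (some 6)).toList = c.toList.take 6 := by simp [pysem]
  rw [hs, eq_comm, pv_take_small _ _ _ hk]

-- B's condition "k == code[:n]" for a key of exactly n characters
theorem pv_slice_exact (c k : String) :
    (k = PySem.Str.slice c none (some 6)) ↔ c.toList.take 6 = k.toList := by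
  rw [← String.toList_inj]
  have hs : (PySem.Str.slice c none (some 6)).toList = c.toList.take 6 := by simp [pysem]
  rw [hs, eq_comm]

theorem pv_slice4 (c k : String) :
    (k = PySem.Str.slice c none (some 4)) ↔ c.toList.take 4 = k.toList := by
  rw [← String.toList_inj]
  have hs : (PySem.Str.slice c none (some 4)).toList = c.toList.take 4 := by simp [pysem]
  rw [hs, eq_comm]

-- B's condition ""104100" == code[:4]" can never hold (length 6 vs at most 4)
theorem pv_slice_long (c : String) :
    ("104100" = PySem.Str.slice c none (some 4)) ↔ False := by
  rw [← String.toList_inj]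
  have hs : (PySem.Str.slice c none (some 4)).toList = c.toList.take 4 := by simp [pysem]
  rw [hs]
  simp only [iff_false]
  intro he
  have hlen := congrArg List.length he
  rw [List.length_take] at hlen
  have h6 : ("104100" : String).toList.length = 6 := by decide
  omega

theorem pv_tax_mk : pvTaxonomy = PySem.Dict.mk
  [("101Y", "counselor"),
   ("103T", "psychologist"),
   ("1041", "social_worker"),
   ("104100", "social_worker"),
   ("2084", "psychiatrist"),
   ("163W", "therapist"),
   ("364S", "therapist"),
   ("363L", "therapist"),
   ("106H", "therapist"),
   ("106S", "therapist"),
   ("225X", "therapist"),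
   ("261Q", "clinic"),
   ("273R", "clinic"),
   ("273Y", "clinic"),
   ("283Q", "clinic"),
   ("322D", "clinic"),
   ("251S", "clinic")] := rfl

theorem pv_sorted_keys : PySem.List.sorted pvTaxonomy.keys (fun k => PySem.Str.len k) true =
    ["104100", "101Y", "103T", "1041", "2084", "163W", "364S", "363L", "106H", "106S", "225X", "261Q", "273R", "273Y", "283Q", "322D", "251S"] := by decide

theorem pv_get_mk_nil (x : String) : (PySem.Dict.mk ([] : List (String × String))).get? x = none := by
  simp [PySem.Dict.get?]

theorem pvTryB_cons (c : String) (L : Int) (rest : List Int) :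
    pvTryB c (L :: rest) =
      (pvTaxonomy.get? (PySem.Str.slice c none (some L))).getD (pvTryB c rest) := by
  cases h : pvTaxonomy.get? (PySem.Str.slice c none (some L)) <;> simp [pvTryB, h]

theorem pv_getD_ite (P : Prop) [Decidable P] (v : String) (o : Option String) (r : String) :
    (if P then some v else o).getD r = if P then v else o.getD r := by
  split <;> rfl

-- A's scan, normalised to equations on the first 4/6 characters
def pvAfrm (l : List Char) : String :=
  if l.take 6 = "104100".toList then "social_worker"
  else if l.take 4 = "101Y".toList then "counselor"
  else if l.take 4 = "103T".toList then "psychologist"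
  else if l.take 4 = "1041".toList then "social_worker"
  else if l.take 4 = "2084".toList then "psychiatrist"
  else if l.take 4 = "163W".toList then "therapist"
  else if l.take 4 = "364S".toList then "therapist"
  else if l.take 4 = "363L".toList then "therapist"
  else if l.take 4 = "106H".toList then "therapist"
  else if l.take 4 = "106S".toList then "therapist"
  else if l.take 4 = "225X".toList then "therapist"
  else if l.take 4 = "261Q".toList then "clinic"
  else if l.take 4 = "273R".toList then "clinic"
  else if l.take 4 = "273Y".toList then "clinic"
  else if l.take 4 = "283Q".toList then "clinic"
  else if l.take 4 = "322D".toList then "clinic"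
  else if l.take 4 = "251S".toList then "clinic"
  else "therapist"

-- B's two lookups, normalised the same way
def pvBfrm (l : List Char) : String :=
  if l = "101Y".toList then "counselor"
  else if l = "103T".toList then "psychologist"
  else if l = "1041".toList then "social_worker"
  else if l.take 6 = "104100".toList then "social_worker"
  else if l = "2084".toList then "psychiatrist"
  else if l = "163W".toList then "therapist"
  else if l = "364S".toList then "therapist"
  else if l = "363L".toList then "therapist"
  else if l = "106H".toList then "therapist"
  else if l = "106S".toList then "therapist"
  else if l = "225X".toList then "therapist"
  else if l = "261Q".toList then "clinic"
  else if l = "273R".toList then "clinic"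
  else if l = "273Y".toList then "clinic"
  else if l = "283Q".toList then "clinic"
  else if l = "322D".toList then "clinic"
  else if l = "251S".toList then "clinic"
  else if l.take 4 = "101Y".toList then "counselor"
  else if l.take 4 = "103T".toList then "psychologist"
  else if l.take 4 = "1041".toList then "social_worker"
  else if l.take 4 = "2084".toList then "psychiatrist"
  else if l.take 4 = "163W".toList then "therapist"
  else if l.take 4 = "364S".toList then "therapist"
  else if l.take 4 = "363L".toList then "therapist"
  else if l.take 4 = "106H".toList then "therapist"
  else if l.take 4 = "106S".toList then "therapist"
  else if l.take 4 = "225X".toList then "therapist"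
  else if l.take 4 = "261Q".toList then "clinic"
  else if l.take 4 = "273R".toList then "clinic"
  else if l.take 4 = "273Y".toList then "clinic"
  else if l.take 4 = "283Q".toList then "clinic"
  else if l.take 4 = "322D".toList then "clinic"
  else if l.take 4 = "251S".toList then "clinic"
  else "therapist"

theorem stageA (c : String) :
    pvScanA c ["104100", "101Y", "103T", "1041", "2084", "163W", "364S", "363L", "106H", "106S", "225X", "261Q", "273R", "273Y", "283Q", "322D", "251S"] = pvAfrm c.toList := by
  simp only [pvScanA, pvAfrm, sw_iff c "104100" 6 (by decide), sw_iff c "101Y" 4 (by decide), sw_iff c "103T" 4 (by decide), sw_iff c "1041" 4 (by decide), sw_iff c "2084" 4 (by decide), sw_iff c "163W" 4 (by decide), sw_iff c "364S" 4 (by decide), sw_iff c "363L" 4 (by decide), sw_iff c "106H" 4 (by decide), sw_iff c "106S" 4 (by decide), sw_iff c "225X" 4 (by decide), sw_iff c "261Q" 4 (by decide), sw_iff c "273R" 4 (by decide), sw_iff c "273Y" 4 (by decide), sw_iff c "283Q" 4 (by decide), sw_iff c "322D" 4 (by decide), sw_iff c "251S" 4 (by decide)]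
  rfl

theorem pvTryB_nil (c : String) : pvTryB c [] = "therapist" := by simp [pvTryB]

theorem stageB (c : String) : pvTryB c [6, 4] = pvBfrm c.toList := by
  simp only [pvTryB_nil, pvTryB_cons, pv_tax_mk, PySem.Dict.get?_mk_cons, pv_get_mk_nil,
    beq_iff_eq, pv_getD_ite, Option.getD_none,
    pv_slice_small c "101Y" (by decide), pv_slice_small c "103T" (by decide), pv_slice_small c "1041" (by decide), pv_slice_exact c "104100", pv_slice_small c "2084" (by decide), pv_slice_small c "163W" (by decide), pv_slice_small c "364S" (by decide), pv_slice_small c "363L" (by decide), pv_slice_small c "106H" (by decide), pv_slice_small c "106S" (by decide), pv_slice_small c "225X" (by decide), pv_slice_small c "261Q" (by decide), pv_slice_small c "273R" (by decide), pv_slice_small c "273Y" (by decide), pv_slice_small c "283Q" (by decide), pv_slice_small c "322D" (by decide), pv_slice_small c "251S" (by decide),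
    pv_slice4 c "101Y", pv_slice4 c "103T", pv_slice4 c "1041", pv_slice_long c, pv_slice4 c "2084", pv_slice4 c "163W", pv_slice4 c "364S", pv_slice4 c "363L", pv_slice4 c "106H", pv_slice4 c "106S", pv_slice4 c "225X", pv_slice4 c "261Q", pv_slice4 c "273R", pv_slice4 c "273Y", pv_slice4 c "283Q", pv_slice4 c "322D", pv_slice4 c "251S", if_false, pvBfrm]

theorem pv_core (l : List Char) : pvAfrm l = pvBfrm l := by
  by_cases hm : l ∈ ["101Y".toList, "103T".toList, "1041".toList, "2084".toList, "163W".toList, "364S".toList, "363L".toList, "106H".toList, "106S".toList, "225X".toList, "261Q".toList, "273R".toList, "273Y".toList, "283Q".toList, "322D".toList, "251S".toList]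
  · fin_cases hm <;> decide
  · simp only [List.mem_cons, List.not_mem_nil, or_false, not_or] at hm
    obtain ⟨n1, n2, n3, n4, n5, n6, n7, n8, n9, n10, n11, n12, n13, n14, n15, n16⟩ := hm
    by_cases h6 : l.take 6 = "104100".toList
    · simp only [pvAfrm, pvBfrm]
      rw [if_pos h6, if_neg n1, if_neg n2, if_neg n3, if_pos h6]
    · simp only [pvAfrm, pvBfrm]
      rw [if_neg h6, if_neg n1, if_neg n2, if_neg n3, if_neg h6, if_neg n4, if_neg n5,
        if_neg n6, if_neg n7, if_neg n8, if_neg n9, if_neg n10, if_neg n11, if_neg n12,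
        if_neg n13, if_neg n14, if_neg n15, if_neg n16]

-- ===== VERDICT (by name: the statement is the Claim_ definition above) =====
theorem get_provider_type_slug_spec : Claim_equal_get_provider_type_slug := by
  intro code _
  unfold Spec_get_provider_type_slug get_provider_type_slug get_provider_type_slug_alt
  by_cases h : code = ""
  · subst h; decide
  · rw [if_neg h, pv_sorted_keys, stageA, stageB, pv_core]
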